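-- pv_equiv track=rewrite | github.com/samay-rajput/WINGS_PROMPTERS | backend/app/entry_detector.py | _detect_repo_type
-- ===== SOURCE A (Python) =====
-- from typing import List, Optional, Tuple
--
-- def _detect_repo_type(paths: List[str]) -> str:
--     lower = [p.lower() for p in paths]
--
--     if any("docusaurus.config" in p for p in lower):
--         return "static_site"
--
--     if any("vite.config" in p or "next.config" in p for p in lower):
--         return "frontend"
--
--     if any(p.endswith("server.js") or p.endswith("app.py") for p in lower):
--         return "backend"
--
--     if any(p.endswith(".php") for p in lower):
--         return "php_web"
--
--     return "generic"
-- ===== SOURCE B (Python) =====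
-- def _detect_repo_type(paths):
--     static_site = frontend = backend = php_web = False
--     for p in paths:
--         q = p.lower()
--         if "docusaurus.config" in q:
--             static_site = True
--         if "vite.config" in q or "next.config" in q:
--             frontend = True
--         if q.endswith("server.js") or q.endswith("app.py"):
--             backend = True
--         if q.endswith(".php"):
--             php_web = True
--     if static_site:
--         return "static_site"
--     if frontend:
--         return "frontend"
--     if backend:
--         return "backend"
--     if php_web:
--         return "php_web"
--     return "generic"
-- ===== Notes on version B (the rewrite author's own statement) =====
-- stated objective: alternative
-- what changed: Replaces four separate short-circuiting any-scans over a pre-built lowercased list with one pass over the paths that lowercases each path once and accumulates four boolean flags, then decides by priority after the loop.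
import Mathlib
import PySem

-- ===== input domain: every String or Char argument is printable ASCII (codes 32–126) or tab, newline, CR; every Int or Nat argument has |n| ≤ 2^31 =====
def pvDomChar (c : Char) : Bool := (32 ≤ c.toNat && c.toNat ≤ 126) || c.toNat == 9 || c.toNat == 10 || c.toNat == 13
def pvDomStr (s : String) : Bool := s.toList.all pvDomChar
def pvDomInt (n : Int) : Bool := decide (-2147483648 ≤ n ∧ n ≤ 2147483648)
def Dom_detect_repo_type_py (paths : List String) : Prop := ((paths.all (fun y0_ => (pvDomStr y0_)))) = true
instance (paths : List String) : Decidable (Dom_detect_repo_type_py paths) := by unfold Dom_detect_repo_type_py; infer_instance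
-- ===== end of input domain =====

-- B replaces A's four separate any-scans over a pre-built lowercased list with one pass
-- accumulating four boolean flags, then decides by the same priority (alternative decomposition).

-- ===== PORT A =====
def detect_repo_type_py (paths : List String) : String :=
  let lower := paths.map (fun p => PySem.Str.lower p)
  if lower.any (fun p => PySem.Str.isIn "docusaurus.config" p) then "static_site"
  else if lower.any (fun p => PySem.Str.isIn "vite.config" p || PySem.Str.isIn "next.config" p) then "frontend"
  else if lower.any (fun p => PySem.Str.endswith p "server.js" || PySem.Str.endswith p "app.py") then "backend"
  else if lower.any (fun p => PySem.Str.endswith p ".php") then "php_web"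
  else "generic"

-- ===== PORT B =====
def pvStepB (f : Bool × Bool × Bool × Bool) (p : String) : Bool × Bool × Bool × Bool :=
  let q := PySem.Str.lower p
  (f.1 || PySem.Str.isIn "docusaurus.config" q,
   f.2.1 || (PySem.Str.isIn "vite.config" q || PySem.Str.isIn "next.config" q),
   f.2.2.1 || (PySem.Str.endswith q "server.js" || PySem.Str.endswith q "app.py"),
   f.2.2.2 || PySem.Str.endswith q ".php")

def detect_repo_type_py_alt (paths : List String) : String :=
  let flags := paths.foldl pvStepB (false, false, false, false)
  if flags.1 then "static_site"
  else if flags.2.1 then "frontend"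
  else if flags.2.2.1 then "backend"
  else if flags.2.2.2 then "php_web"
  else "generic"

-- ===== PRECONDITION & SPEC =====
def Spec_detect_repo_type_py (paths : List String) (out : String) : Prop := out = detect_repo_type_py_alt paths
instance (paths : List String) (out : String) : Decidable (Spec_detect_repo_type_py paths out) := by unfold Spec_detect_repo_type_py; infer_instance

-- ===== CLAIM (what is proved, stated in full; the proofs are below) =====
def Claim_equal_detect_repo_type_py : Prop := ∀ (paths : List String), Dom_detect_repo_type_py paths → Spec_detect_repo_type_py paths (detect_repo_type_py paths)

-- ===== LEMMAS AND PROOFS =====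

-- the fold computes exactly the four any-predicates, or-ed onto the initial flags
theorem pv_foldl_flags (paths : List String) (f : Bool × Bool × Bool × Bool) :
    paths.foldl pvStepB f =
      (f.1 || paths.any (fun p => PySem.Str.isIn "docusaurus.config" (PySem.Str.lower p)),
       f.2.1 || paths.any (fun p => PySem.Str.isIn "vite.config" (PySem.Str.lower p) || PySem.Str.isIn "next.config" (PySem.Str.lower p)),
       f.2.2.1 || paths.any (fun p => PySem.Str.endswith (PySem.Str.lower p) "server.js" || PySem.Str.endswith (PySem.Str.lower p) "app.py"),
       f.2.2.2 || paths.any (fun p => PySem.Str.endswith (PySem.Str.lower p) ".php")) := by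
  induction paths generalizing f with
  | nil => simp
  | cons p ps ih =>
    simp only [List.foldl_cons, List.any_cons, ih, pvStepB]
    simp [Bool.or_assoc]

-- ===== VERDICT (by name: the statement is the Claim_ definition above) =====
theorem detect_repo_type_py_spec : Claim_equal_detect_repo_type_py := by
  intro paths _
  unfold Spec_detect_repo_type_py detect_repo_type_py detect_repo_type_py_alt
  simp only [pv_foldl_flags, List.any_map, Bool.false_or]
  rfl
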